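-- pv_equiv track=rewrite | github.com/Bakhtaki/Hackerrank | problem-solving/Find_Strings.py | find_ith
-- ===== SOURCE A (Python) =====
-- def find_ith(suffixes, LCP, i):
--     data = zip(suffixes, LCP)
--     low = high = 0
--     for suf, lcp in data:
--         if lcp is None:
--             lcp = 0
--         high += len(suf) - lcp
--         if high - 1 == i:
--             return suf
--         elif high - 1 > i:
--             for _i, j in enumerate(list(range(lcp, len(suf)))):
--                 if low + _i == i:
--                     return suf[:j+1]
--         low = high
--     return "INVALID"
-- ===== SOURCE B (Python) =====
-- def find_ith(suffixes, LCP, i):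
--     # One pass with direct index arithmetic: no inner scan, no materialized range list.
--     low = 0
--     for suf, lcp in zip(suffixes, LCP):
--         if lcp is None:
--             lcp = 0
--         high = low + len(suf) - lcp
--         if high - 1 == i:
--             return suf
--         if high - 1 > i and low <= i:
--             return suf[:lcp + i - low + 1]
--         low = high
--     return "INVALID"
-- ===== Notes on version B (the rewrite author's own statement) =====
-- stated objective: simpler
-- what changed: A's inner loop, which materializes list(range(lcp, len(suf))) and scans it with enumerate to find the matching prefix, is replaced by direct index arithmetic: one O(1) test per suffix and a single slice suf[:lcp+i-low+1]; the redundant running 'high' variable is folded into a recomputed local.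
import Mathlib
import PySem

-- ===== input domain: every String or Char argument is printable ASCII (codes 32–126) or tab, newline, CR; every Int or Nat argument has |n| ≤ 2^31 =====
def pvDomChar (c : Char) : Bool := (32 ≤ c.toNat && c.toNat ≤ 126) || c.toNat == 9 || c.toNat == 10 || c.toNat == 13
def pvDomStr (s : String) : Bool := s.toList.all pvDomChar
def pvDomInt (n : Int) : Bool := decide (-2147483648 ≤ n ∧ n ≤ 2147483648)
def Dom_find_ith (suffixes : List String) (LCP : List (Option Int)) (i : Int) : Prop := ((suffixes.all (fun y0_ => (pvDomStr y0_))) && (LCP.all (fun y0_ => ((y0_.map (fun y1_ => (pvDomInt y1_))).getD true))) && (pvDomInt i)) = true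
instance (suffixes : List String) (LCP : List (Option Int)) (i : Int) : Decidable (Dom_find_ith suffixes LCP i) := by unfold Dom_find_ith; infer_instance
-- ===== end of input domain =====

-- B replaces A's inner enumerate-over-range scan by direct index arithmetic (one O(1) test per suffix); alternative/simpler.

-- ===== PORT A =====
-- inner loop: for _i, j in enumerate(list(range(lcp, len(suf)))): if low + _i == i: return suf[:j+1]
def find_ith_innerA (suf : String) (low i : Int) : Int → List Int → Option String
  | _, [] => none
  | t, j :: js =>
    if low + t = i then some (PySem.Str.slice suf none (some (j + 1)))
    else find_ith_innerA suf low i (t + 1) js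

-- outer loop over zip(suffixes, LCP) with running low/high
def find_ith_loopA (i : Int) : Int → Int → List (String × Option Int) → String
  | _, _, [] => "INVALID"
  | low, high, (suf, olcp) :: rest =>
    let lcp : Int := match olcp with | none => 0 | some v => v
    let high' := high + PySem.Str.len suf - lcp
    if high' - 1 = i then suf
    else if high' - 1 > i then
      match find_ith_innerA suf low i 0 (PySem.List.pyRange lcp (PySem.Str.len suf) 1) with
      | some s => s
      | none => find_ith_loopA i high' high' rest
    else find_ith_loopA i high' high' rest

def find_ith (suffixes : List String) (LCP : List (Option Int)) (i : Int) : String :=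
  find_ith_loopA i 0 0 (suffixes.zip LCP)

-- ===== PORT B =====
def find_ith_loopB (i : Int) : Int → List (String × Option Int) → String
  | _, [] => "INVALID"
  | low, (suf, olcp) :: rest =>
    let lcp : Int := match olcp with | none => 0 | some v => v
    let high := low + PySem.Str.len suf - lcp
    if high - 1 = i then suf
    else if high - 1 > i ∧ low ≤ i then PySem.Str.slice suf none (some (lcp + i - low + 1))
    else find_ith_loopB i high rest

def find_ith_alt (suffixes : List String) (LCP : List (Option Int)) (i : Int) : String :=
  find_ith_loopB i 0 (suffixes.zip LCP)

-- ===== PRECONDITION & SPEC =====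
def Spec_find_ith (suffixes : List String) (LCP : List (Option Int)) (i : Int) (out : String) : Prop := out = find_ith_alt suffixes LCP i
instance (suffixes : List String) (LCP : List (Option Int)) (i : Int) (out : String) : Decidable (Spec_find_ith suffixes LCP i out) := by unfold Spec_find_ith; infer_instance

-- ===== CLAIM (what is proved, stated in full; the proofs are below) =====
def Claim_equal_find_ith : Prop := ∀ (suffixes : List String) (LCP : List (Option Int)) (i : Int), Dom_find_ith suffixes LCP i → Spec_find_ith suffixes LCP i (find_ith suffixes LCP i)

-- ===== LEMMAS AND PROOFS =====

-- A's inner scan finds nothing when the target index i is below the running counter.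
lemma innerA_none (suf : String) (low i : Int) :
    ∀ (js : List Int) (t : Int), i < low + t → find_ith_innerA suf low i t js = none := by
  intro js
  induction js with
  | nil => intro t _; rfl
  | cons j js ih =>
    intro t ht
    unfold find_ith_innerA
    rw [if_neg (by omega)]
    exact ih (t + 1) (by omega)

-- On the arithmetic list range(a, L), A's inner scan finds exactly the directly computed slice.
lemma innerA_found (suf : String) (low i : Int) :
    ∀ (n : Nat) (a t : Int), (PySem.Str.len suf - a).toNat = n →
    low + t ≤ i → i - low - t < PySem.Str.len suf - a →
    find_ith_innerA suf low i t (PySem.List.pyRange a (PySem.Str.len suf) 1)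
      = some (PySem.Str.slice suf none (some (a + (i - low - t) + 1))) := by
  intro n
  induction n with
  | zero => intro a t hn h1 h2; omega
  | succ m ih =>
    intro a t hn h1 h2
    have ha : a < PySem.Str.len suf := by omega
    rw [PySem.List.pyRange_one_cons ha]
    unfold find_ith_innerA
    by_cases hc : low + t = i
    · rw [if_pos hc]
      have : a + (i - low - t) + 1 = a + 1 := by omega
      rw [this]
    · rw [if_neg hc]
      have e : (a + 1) + (i - low - (t + 1)) + 1 = a + (i - low - t) + 1 := by omega
      rw [ih (a + 1) (t + 1) (by omega) (by omega) (by omega), e]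

-- A's outer loop (entered with low = high) computes B's loop.
lemma loopA_eq_loopB (i : Int) :
    ∀ (ps : List (String × Option Int)) (low : Int),
      find_ith_loopA i low low ps = find_ith_loopB i low ps := by
  intro ps
  induction ps with
  | nil => intro low; rfl
  | cons p rest ih =>
    intro low
    obtain ⟨suf, olcp⟩ := p
    unfold find_ith_loopA find_ith_loopB
    simp only
    set lcp : Int := (match olcp with | none => 0 | some v => v) with hlcp
    set L : Int := PySem.Str.len suf with hL
    by_cases h1 : low + L - lcp - 1 = i
    · rw [if_pos h1, if_pos h1]
    · rw [if_neg h1, if_neg h1]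
      by_cases h2 : low + L - lcp - 1 > i
      · rw [if_pos h2]
        by_cases h3 : low ≤ i
        · rw [if_pos ⟨h2, h3⟩]
          rw [innerA_found suf low i (L - lcp).toNat lcp 0 (by omega) (by omega) (by omega)]
          have e : lcp + (i - low - 0) + 1 = lcp + i - low + 1 := by omega
          rw [e]
        · rw [if_neg (by tauto)]
          rw [innerA_none suf low i _ 0 (by omega)]
          exact ih _
      · rw [if_neg h2, if_neg (by tauto)]
        exact ih _

-- ===== VERDICT (by name: the statement is the Claim_ definition above) =====
theorem find_ith_spec : Claim_equal_find_ith := by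
  intro suffixes LCP i _
  unfold Spec_find_ith find_ith find_ith_alt
  exact loopA_eq_loopB i (suffixes.zip LCP) 0
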